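-- pv_equiv track=rewrite | github.com/Mematoru23/Uni-Stuff | Algorithms and Programming/Lab3Aplicatie89/Lab3Aplicatie89/Lab3Aplicatie89.py | seq_2
-- ===== SOURCE A (Python) =====
-- def seq_2(lista):
-- 	maxLen, currLen, first, last = 0, 0, 0, 0
-- 	lst = []
-- 	for i in range(len(lista)):
-- 		if lista[i] >= 0 and lista[i] <= 10:
-- 			currLen += 1
-- 			if currLen > maxLen:
-- 				maxLen = currLen
-- 				first = i - currLen
-- 				last = i
-- 		else:
-- 			currLen = 0
--
-- 	for i in range(first + 1, last + 1):
-- 		lst.append(lista[i])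
--
-- 	return lst
-- ===== SOURCE B (Python) =====
-- def seq_2(lista):
--     # Partition-then-select: scan maximal in-range runs and keep the first longest.
--     best = []
--     i, n = 0, len(lista)
--     while i < n:
--         if 0 <= lista[i] <= 10:
--             j = i
--             while j < n and 0 <= lista[j] <= 10:
--                 j += 1
--             run = lista[i:j]
--             if len(run) > len(best):
--                 best = run
--             i = j
--         else:
--             i += 1
--     return best
-- ===== Notes on version B (the rewrite author's own statement) =====
-- stated objective: idiomatic
-- what changed: Replaced A's index loop with maxLen/currLen/first/last bookkeeping plus a second index loop re-reading the list by a single partition-then-select scan that extracts each maximal in-range run and keeps the first strictly longest one.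
import Mathlib
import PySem

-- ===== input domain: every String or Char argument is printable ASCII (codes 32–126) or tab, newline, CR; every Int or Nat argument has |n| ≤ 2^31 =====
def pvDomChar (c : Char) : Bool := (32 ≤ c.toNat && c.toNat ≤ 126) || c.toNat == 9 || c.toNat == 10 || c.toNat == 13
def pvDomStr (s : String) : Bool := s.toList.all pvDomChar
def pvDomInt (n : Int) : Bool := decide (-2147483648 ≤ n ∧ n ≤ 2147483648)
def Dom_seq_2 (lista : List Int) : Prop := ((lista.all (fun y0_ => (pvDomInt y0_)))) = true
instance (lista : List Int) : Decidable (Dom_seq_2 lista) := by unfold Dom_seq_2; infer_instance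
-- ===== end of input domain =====

-- B replaces A's running index/length bookkeeping by a partition-then-select scan over maximal
-- in-range runs (idiomatic; same O(n) cost).

-- ===== PORT A =====
-- A's index loop over range(len(lista)); state = (maxLen, currLen, first, last).
-- pyGetD is exact here: every index produced by the loops is in range.
def seq_2 (lista : List Int) : List Int :=
  let st := (PySem.List.pyRange 0 (PySem.List.len lista) 1).foldl
    (fun (st : Int × Int × Int × Int) i =>
      let v := PySem.List.pyGetD lista i 0
      if v ≥ 0 ∧ v ≤ 10 then
        let c := st.2.1 + 1
        if c > st.1 then (c, c, i - c, i) else (st.1, c, st.2.2.1, st.2.2.2)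
      else (st.1, 0, st.2.2.1, st.2.2.2))
    (0, 0, 0, 0)
  (PySem.List.pyRange (st.2.2.1 + 1) (st.2.2.2 + 1) 1).foldl
    (fun acc i => acc ++ [PySem.List.pyGetD lista i 0]) []

-- ===== PORT B =====
-- B's in-range test 0 <= x <= 10
def bInR (x : Int) : Bool := decide (0 ≤ x) && decide (x ≤ 10)

-- B's outer while loop: at an in-range element take the whole maximal run (inner while / slice),
-- keep it if strictly longer than best, continue after the run; else advance one element.
def seq2Go : List Int → List Int → List Int
  | [], best => best
  | x :: xs, best =>
    if bInR x then
      let run := x :: xs.takeWhile bInR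
      seq2Go (xs.dropWhile bInR) (if run.length > best.length then run else best)
    else
      seq2Go xs best
  termination_by l => l.length
  decreasing_by
  · exact Nat.lt_succ_of_le (List.length_dropWhile_le bInR xs)
  · exact Nat.lt_succ_self xs.length

def seq_2_alt (lista : List Int) : List Int := seq2Go lista []

-- ===== PRECONDITION & SPEC =====
def Spec_seq_2 (lista : List Int) (out : List Int) : Prop := out = seq_2_alt lista
instance (lista : List Int) (out : List Int) : Decidable (Spec_seq_2 lista out) := by unfold Spec_seq_2; infer_instance

-- ===== CLAIM (what is proved, stated in full; the proofs are below) =====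
def Claim_equal_seq_2 : Prop := ∀ (lista : List Int), Dom_seq_2 lista → Spec_seq_2 lista (seq_2 lista)

-- ===== LEMMAS AND PROOFS =====

-- A's loop body as a step over (index, element) pairs
def stepA (st : Int × Int × Int × Int) (p : Int × Int) : Int × Int × Int × Int :=
  if p.2 ≥ 0 ∧ p.2 ≤ 10 then
    let c := st.2.1 + 1
    if c > st.1 then (c, c, p.1 - c, p.1) else (st.1, c, st.2.2.1, st.2.2.2)
  else (st.1, 0, st.2.2.1, st.2.2.2)

-- A's final answer-building loop (lista[first+1 .. last])
def ansA (lista : List Int) (f la : Int) : List Int :=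
  (PySem.List.pyRange (f + 1) (la + 1) 1).foldl
    (fun acc i => acc ++ [PySem.List.pyGetD lista i 0]) []

lemma seq_2_eq_enum (lista : List Int) :
    seq_2 lista =
      (fun st => ansA lista st.2.2.1 st.2.2.2)
        ((PySem.List.enumerate lista 0).foldl stepA (0, 0, 0, 0)) := by
  rw [PySem.List.enumerate_eq_map_pyRange lista 0, List.foldl_map]
  rfl

lemma ansA_eq_map (lista : List Int) (f la : Int) :
    ansA lista f la =
      (PySem.List.pyRange (f + 1) (la + 1) 1).map (fun i => PySem.List.pyGetD lista i 0) := by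
  simpa [ansA] using
    PySem.List.foldl_append_singleton_eq_map (fun i => PySem.List.pyGetD lista i 0)
      (PySem.List.pyRange (f + 1) (la + 1) 1) []

lemma getD_range_take (xs : List Int) (a k : Nat) (h : a + k ≤ xs.length) :
    (List.range k).map (fun t => xs.getD (a + t) 0) = (xs.drop a).take k := by
  apply List.ext_getElem
  · simp; omega
  · intro i h1 h2
    simp only [List.getElem_map, List.getElem_range, List.getElem_take, List.getElem_drop]
    rw [List.getD_eq_getElem xs 0 (by simp at h1; omega)]

-- A's answer loop between indices a and a+k reads back exactly the slice xs[a:a+k]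
lemma ansA_slice (xs : List Int) (a k : Nat) (h : a + k ≤ xs.length) :
    ansA xs ((a : Int) - 1) ((a : Int) + (k : Int) - 1) = (xs.drop a).take k := by
  rw [ansA_eq_map]
  have h1 : (a : Int) - 1 + 1 = (a : Int) := by ring
  have h2 : (a : Int) + (k : Int) - 1 + 1 = (a : Int) + (k : Int) := by ring
  rw [h1, h2, PySem.List.pyRange_one]
  have h3 : ((a : Int) + (k : Int) - (a : Int)).toNat = k := by omega
  rw [h3, List.map_map]
  have : ((fun i => PySem.List.pyGetD xs i 0) ∘ fun t : Nat => (a : Int) + (t : Int)) =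
      fun t : Nat => xs.getD (a + t) 0 := by
    funext t
    simp only [Function.comp]
    rw [show (a : Int) + (t : Int) = ((a + t : Nat) : Int) by push_cast; ring,
      PySem.List.pyGetD_natCast]
  rw [this, getD_range_take xs a k h]

-- A's loop over a block of in-range elements, in closed form (needs c ≤ m, which the loop maintains)
lemma runA (r : List Int) (hr : ∀ x ∈ r, 0 ≤ x ∧ x ≤ 10) :
    ∀ (s m c f la : Int), c ≤ m →
      (PySem.List.enumerate r s).foldl stepA (m, c, f, la) =
        if c + (r.length : Int) > m then
          (c + r.length, c + r.length, s - c - 1, s + r.length - 1)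
        else (m, c + r.length, f, la) := by
  induction r with
  | nil =>
    intro s m c f la hcm
    simp only [PySem.List.enumerate_nil, List.foldl_nil, List.length_nil]
    rw [if_neg (by omega)]
    simp
  | cons x xs ih =>
    intro s m c f la hcm
    have hx := hr x (by simp)
    rw [PySem.List.enumerate_cons, List.foldl_cons]
    have hstep : stepA (m, c, f, la) (s, x) =
        if c + 1 > m then (c + 1, c + 1, s - (c + 1), s) else (m, c + 1, f, la) := by
      simp only [stepA]
      rw [if_pos (show x ≥ 0 ∧ x ≤ 10 from ⟨hx.1, hx.2⟩)]
    rw [hstep]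
    have hr' : ∀ y ∈ xs, 0 ≤ y ∧ y ≤ 10 := fun y hy => hr y (by simp [hy])
    by_cases h1 : c + 1 > m
    · rw [if_pos h1, ih hr' (s + 1) (c + 1) (c + 1) (s - (c + 1)) s le_rfl]
      simp only [List.length_cons]
      push_cast
      split_ifs <;> (simp only [Prod.mk.injEq]; and_intros <;> first | trivial | omega)
    · rw [if_neg h1, ih hr' (s + 1) m (c + 1) f la (by omega)]
      simp only [List.length_cons]
      push_cast
      split_ifs <;> (simp only [Prod.mk.injEq]; and_intros <;> first | trivial | omega)

-- members of a maximal run are in range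
lemma run_mem (x : Int) (xs : List Int) (hx : bInR x = true) :
    ∀ y ∈ x :: xs.takeWhile bInR, 0 ≤ y ∧ y ≤ 10 := by
  intro y hy
  rcases List.mem_cons.mp hy with h | h
  · subst h; simpa [bInR] using hx
  · have := List.mem_takeWhile_imp h
    simpa [bInR] using this

-- main invariant: A's loop continued from a recorded best equals B's run scan
lemma mainA (lista : List Int) :
    ∀ (n : Nat) (l pre : List Int) (f la : Int) (best : List Int),
      l.length = n → lista = pre ++ l → ansA lista f la = best →
      (fun st => ansA lista st.2.2.1 st.2.2.2)
          ((PySem.List.enumerate l (pre.length : Int)).foldl stepA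
            ((best.length : Int), 0, f, la)) = seq2Go l best := by
  intro n
  induction n using Nat.strong_induction_on with
  | _ n ih =>
    intro l pre f la best hn hsplit hans
    match l, hn with
    | [], _ =>
      simp only [PySem.List.enumerate_nil, List.foldl_nil, seq2Go]
      exact hans
    | x :: xs, hn =>
      by_cases hx : bInR x = true
      · -- a maximal in-range run r starts here
        set r : List Int := x :: xs.takeWhile bInR with hrdef
        set rest : List Int := xs.dropWhile bInR with hrestdef
        have hsplit2 : x :: xs = r ++ rest := by
          simp [hrdef, hrestdef, List.takeWhile_append_dropWhile]
        have hrl : 1 ≤ r.length := by simp [hrdef]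
        have hlen : r.length + rest.length = xs.length + 1 := by
          have := congrArg List.length hsplit2
          simp at this; omega
        conv_lhs => rw [hsplit2]
        rw [PySem.List.enumerate_append, List.foldl_append]
        rw [runA r (run_mem x xs hx) _ _ 0 f la (by positivity)]
        have hlistalen : pre.length + r.length + rest.length = lista.length := by
          have := congrArg List.length hsplit
          rw [hsplit2] at this; simp at this; omega
        have hslice : ansA lista ((pre.length : Int) - 1)
            ((pre.length : Int) + (r.length : Int) - 1) = r := by
          have hdrop : (lista.drop pre.length).take r.length = r := by
            rw [hsplit, hsplit2, List.drop_left, List.take_left]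
          rw [ansA_slice lista pre.length r.length (by omega)]
          exact hdrop
        have hgo : seq2Go (x :: xs) best =
            seq2Go rest (if r.length > best.length then r else best) := by
          rw [seq2Go, if_pos hx]
        rw [hgo]
        simp only [zero_add, sub_zero]
        by_cases hbig : (r.length : Int) > (best.length : Int)
        · rw [if_pos hbig]
          have hbig' : r.length > best.length := by exact_mod_cast hbig
          rw [if_pos hbig']
          match rest, hlen, hrestdef with
          | [], _, _ =>
            simp only [PySem.List.enumerate_nil, List.foldl_nil]
            rw [seq2Go]
            simpa using hslice
          | y :: ys, hlen, hrestdef =>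
            have hy : ¬ bInR y = true := by
              have := List.head?_dropWhile_not bInR xs
              rw [← hrestdef] at this; simpa using this
            have hy' : ¬ (0 ≤ y ∧ y ≤ 10) := by simpa [bInR] using hy
            rw [PySem.List.enumerate_cons, List.foldl_cons]
            have hstep : stepA ((r.length : Int), (r.length : Int),
                (pre.length : Int) - 1, (pre.length : Int) + (r.length : Int) - 1)
                ((pre.length : Int) + (r.length : Int), y) =
                ((r.length : Int), 0, (pre.length : Int) - 1,
                  (pre.length : Int) + (r.length : Int) - 1) := by
              simp only [stepA]
              rw [if_neg (by exact fun h => hy' ⟨h.1, h.2⟩)]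
            rw [hstep]
            have hlt : ys.length < n := by
              simp only [List.length_cons] at hn hlen; omega
            have hpre' : lista = (pre ++ r ++ [y]) ++ ys := by
              rw [hsplit, hsplit2]; simp
            have hih := ih ys.length hlt ys (pre ++ r ++ [y])
              ((pre.length : Int) - 1) ((pre.length : Int) + (r.length : Int) - 1) r
              rfl hpre' hslice
            have hidx : (((pre ++ r ++ [y]).length : Nat) : Int) =
                (pre.length : Int) + (r.length : Int) + 1 := by
              push_cast [List.length_append, List.length_cons, List.length_nil]; ring
            rw [hidx] at hih
            rw [seq2Go, if_neg hy]
            exact hih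
        · rw [if_neg hbig]
          have hbig' : ¬ r.length > best.length := by
            intro h; exact hbig (by exact_mod_cast h)
          rw [if_neg hbig']
          match rest, hlen, hrestdef with
          | [], _, _ =>
            simp only [PySem.List.enumerate_nil, List.foldl_nil]
            rw [seq2Go]
            exact hans
          | y :: ys, hlen, hrestdef =>
            have hy : ¬ bInR y = true := by
              have := List.head?_dropWhile_not bInR xs
              rw [← hrestdef] at this; simpa using this
            have hy' : ¬ (0 ≤ y ∧ y ≤ 10) := by simpa [bInR] using hy
            rw [PySem.List.enumerate_cons, List.foldl_cons]
            have hstep : stepA ((best.length : Int), (r.length : Int), f, la)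
                ((pre.length : Int) + (r.length : Int), y) =
                ((best.length : Int), 0, f, la) := by
              simp only [stepA]
              rw [if_neg (by exact fun h => hy' ⟨h.1, h.2⟩)]
            rw [hstep]
            have hlt : ys.length < n := by
              simp only [List.length_cons] at hn hlen; omega
            have hpre' : lista = (pre ++ r ++ [y]) ++ ys := by
              rw [hsplit, hsplit2]; simp
            have hih := ih ys.length hlt ys (pre ++ r ++ [y]) f la best rfl hpre' hans
            have hidx : (((pre ++ r ++ [y]).length : Nat) : Int) =
                (pre.length : Int) + (r.length : Int) + 1 := by
              push_cast [List.length_append, List.length_cons, List.length_nil]; ring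
            rw [hidx] at hih
            rw [seq2Go, if_neg hy]
            exact hih
      · -- out-of-range element: currLen resets, best unchanged
        have hx' : ¬ (0 ≤ x ∧ x ≤ 10) := by simpa [bInR] using hx
        rw [PySem.List.enumerate_cons, List.foldl_cons]
        have hstep : stepA ((best.length : Int), 0, f, la) ((pre.length : Int), x) =
            ((best.length : Int), 0, f, la) := by
          simp only [stepA]
          rw [if_neg (by exact fun h => hx' ⟨h.1, h.2⟩)]
        rw [hstep]
        have hlt : xs.length < n := by
          simp only [List.length_cons] at hn; omega
        have hpre' : lista = (pre ++ [x]) ++ xs := by rw [hsplit]; simp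
        have hih := ih xs.length hlt xs (pre ++ [x]) f la best rfl hpre' hans
        have hidx : (((pre ++ [x]).length : Nat) : Int) = (pre.length : Int) + 1 := by
          push_cast [List.length_append, List.length_cons, List.length_nil]; ring
        rw [hidx] at hih
        rw [seq2Go, if_neg hx]
        exact hih

-- ===== VERDICT (by name: the statement is the Claim_ definition above) =====
theorem seq_2_spec : Claim_equal_seq_2 := by
  intro lista _
  unfold Spec_seq_2
  rw [seq_2_eq_enum]
  have h0 : ansA lista 0 0 = ([] : List Int) := by
    simp [ansA, PySem.List.pyRange_one_eq_nil]
  have := mainA lista lista.length lista [] 0 0 [] rfl (by simp) h0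
  simpa [seq_2_alt] using this
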